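-- pv_equiv track=rewrite | github.com/ysu96/Algorithm-Python | PYTHON/우아한테크코스 1차/4번.py | solution
-- ===== SOURCE A (Python) =====
-- def solution(s):
--     answer = []
--     first = s[0]
--     cnt = 1
--     # 뒤부터 연결된 원소 탐색
--     for i in range(len(s)-1, 0, -1):
--         if s[i] == first:
--             cnt += 1
--         else:
--             break
--
--     # 두 번째 원소부터
--     for i in range(1, len(s)-cnt+1):
--         if s[i] == first:
--             cnt += 1
--         else:
--             answer.append(cnt)
--             first = s[i]
--             cnt = 1
--
--     answer.append(cnt)
--     answer.sort()
--
--     return answer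
-- ===== SOURCE B (Python) =====
-- def solution(s):
--     # ordinary run-length counts in one forward pass, then fold the wrapping
--     # last run into the first when the string ends with its starting character
--     cur = s[0]
--     counts = []
--     n = 0
--     for ch in s:
--         if ch == cur:
--             n += 1
--         else:
--             counts.append(n)
--             cur = ch
--             n = 1
--     counts.append(n)
--     if len(counts) > 1 and s[-1] == s[0]:
--         counts[0] += counts.pop()
--     counts.sort()
--     return counts
-- ===== Notes on version B (the rewrite author's own statement) =====
-- stated objective: simpler
-- what changed: A pre-counts the wrapping trailing run with a backward index scan and then run-length-encodes a truncated index range; B does one plain forward run-length pass over the whole string and afterwards folds the last count into the first when s[-1]==s[0].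
import Mathlib
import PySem

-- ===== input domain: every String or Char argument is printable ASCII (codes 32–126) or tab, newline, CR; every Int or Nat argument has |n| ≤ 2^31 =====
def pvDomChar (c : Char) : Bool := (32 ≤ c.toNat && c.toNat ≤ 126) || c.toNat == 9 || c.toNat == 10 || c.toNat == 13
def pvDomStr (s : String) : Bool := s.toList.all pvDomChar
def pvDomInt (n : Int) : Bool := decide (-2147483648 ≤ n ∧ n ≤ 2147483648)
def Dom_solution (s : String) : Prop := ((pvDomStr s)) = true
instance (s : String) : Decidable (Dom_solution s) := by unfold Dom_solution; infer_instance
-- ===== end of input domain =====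

-- B replaces A's backward pre-scan of the wrapping run plus a truncated index loop by one
-- plain forward run-length pass and a post-merge of the last count into the first (simpler).

-- ===== PORT A =====
-- `for i in range(len(s)-1, 0, -1): if s[i] == first: cnt += 1 else: break`
-- (every index the ranges produce is in range, so pyGetD's default is never read)
def solBack (l : List Char) (first : Char) : List Int → Int → Int
  | [], cnt => cnt
  | i :: rest, cnt =>
      if PySem.List.pyGetD l i ' ' == first then solBack l first rest (cnt + 1) else cnt

-- `for i in range(1, len(s)-cnt+1): …` over the state (answer, first, cnt)
def solFwd (l : List Char) : List Int → List Int × Char × Int → List Int × Char × Int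
  | [], st => st
  | i :: rest, (answer, first, cnt) =>
      if PySem.List.pyGetD l i ' ' == first then solFwd l rest (answer, first, cnt + 1)
      else solFwd l rest (answer ++ [cnt], PySem.List.pyGetD l i ' ', 1)

def solution (s : String) : List Int :=
  let l := s.toList
  match PySem.List.pyGet? l 0 with
  | none => []   -- Python raises IndexError at `s[0]`; excluded by Pre_solution
  | some first =>
    let cnt := solBack l first (PySem.List.pyRange ((l.length : Int) - 1) 0 (-1)) 1
    let st := solFwd l (PySem.List.pyRange 1 ((l.length : Int) - cnt + 1) 1) ([], first, cnt)
    PySem.List.sorted (st.1 ++ [st.2.2]) (fun x => x) false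

-- ===== PORT B =====
-- `for ch in s:` over the state (counts, cur, n)
def altLoop : List Char → List Int × Char × Int → List Int × Char × Int
  | [], st => st
  | ch :: rest, (counts, cur, n) =>
      if ch == cur then altLoop rest (counts, cur, n + 1)
      else altLoop rest (counts ++ [n], ch, 1)

def solution_alt (s : String) : List Int :=
  let l := s.toList
  match PySem.List.pyGet? l 0 with
  | none => []   -- Python raises IndexError at `s[0]`; excluded by Pre_solution
  | some c0 =>
    let st := altLoop l ([], c0, 0)
    let counts := st.1 ++ [st.2.2]
    -- `if len(counts) > 1 and s[-1] == s[0]: counts[0] += counts.pop()`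
    let merged :=
      if counts.length > 1 && (PySem.List.pyGetD l (-1) ' ' == c0) then
        match counts.dropLast, counts.getLast? with
        | h :: t, some p => (h + p) :: t
        | _, _ => counts
      else counts
    PySem.List.sorted merged (fun x => x) false

-- ===== PRECONDITION & SPEC =====
-- Pre_ excludes only the empty string, on which A raises IndexError at `s[0]`.
def Pre_solution (s : String) : Prop := s.toList ≠ []
instance (s : String) : Decidable (Pre_solution s) := by unfold Pre_solution; infer_instance
def pvWitness_solution : String := "aabcaa"

def Spec_solution (s : String) (out : List Int) : Prop := out = solution_alt s
instance (s : String) (out : List Int) : Decidable (Spec_solution s out) := by unfold Spec_solution; infer_instance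

-- ===== CLAIM (what is proved, stated in full; the proofs are below) =====
def Claim_equal_solution : Prop := ∀ (s : String), Dom_solution s → Pre_solution s → Spec_solution s (solution s)

-- ===== LEMMAS AND PROOFS =====

-- length of the leading run of `c` (the element loops stop/emit exactly there)
def runLen (c : Char) : List Char → Nat
  | [] => 0
  | x :: xs => if x = c then runLen c xs + 1 else 0

-- run-length counts of `xs` continuing a current run of `f` already counted `c` times
def runsR (f : Char) (c : Int) : List Char → List Int
  | [] => [c]
  | x :: xs => if x = f then runsR f (c + 1) xs else c :: runsR x 1 xs

-- getLast? of an append with nonempty right part (specialisation of List.getLast?_append)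
theorem getLast?_append_right {α : Type} (l₁ l₂ : List α) (h : l₂ ≠ []) :
    (l₁ ++ l₂).getLast? = l₂.getLast? := by
  rw [List.getLast?_append]
  cases hg : l₂.getLast? with
  | none => exact absurd (List.getLast?_eq_none_iff.1 hg) h
  | some x => rfl

theorem getLast?_cons_ne_nil {α : Type} (x : α) (P : List α) (h : P ≠ []) :
    (x :: P).getLast? = P.getLast? := by
  cases P with
  | nil => exact absurd rfl h
  | cons y ys => simp [List.getLast?_cons_cons]

theorem runLen_le_length (c : Char) (ys : List Char) : runLen c ys ≤ ys.length := by
  induction ys with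
  | nil => simp [runLen]
  | cons x xs ih =>
    by_cases hx : x = c
    · simp [runLen, hx]; omega
    · simp [runLen, hx]

-- runLen decomposes a list into its leading run and a rest not starting with c
theorem runLen_decomp (c : Char) (ys : List Char) :
    ys = List.replicate (runLen c ys) c ++ ys.drop (runLen c ys) ∧
      (ys.drop (runLen c ys)).head? ≠ some c := by
  induction ys with
  | nil => simp [runLen]
  | cons x xs ih =>
    by_cases hx : x = c
    · subst hx
      constructor
      · conv_lhs => rw [ih.1]
        simp [runLen, List.replicate_succ]
      · simpa [runLen] using ih.2
    · constructor
      · simp [runLen, hx]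
      · simp [runLen, hx]

-- Port-A back loop over any index list is 1 step per leading match of the read-out list
theorem solBack_eq (l : List Char) (f : Char) (idxs : List Int) (cnt : Int) :
    solBack l f idxs cnt = cnt + (runLen f (idxs.map (fun i => PySem.List.pyGetD l i ' ')) : Int) := by
  induction idxs generalizing cnt with
  | nil => simp [solBack, runLen]
  | cons i rest ih =>
    by_cases h : PySem.List.pyGetD l i ' ' = f
    · simp [solBack, h, runLen, ih]; ring
    · simp [solBack, h, runLen]

-- Port-A forward loop = B's loop run on the read-out elements
theorem solFwd_eq (l : List Char) (idxs : List Int) (st : List Int × Char × Int) :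
    solFwd l idxs st = altLoop (idxs.map (fun i => PySem.List.pyGetD l i ' ')) st := by
  induction idxs generalizing st with
  | nil => simp [solFwd, altLoop]
  | cons i rest ih =>
    obtain ⟨ans, f, c⟩ := st
    by_cases h : PySem.List.pyGetD l i ' ' = f <;> simp [solFwd, altLoop, h, ih]

-- B's loop computes runsR
theorem altLoop_runsR (xs : List Char) (ans : List Int) (f : Char) (c : Int) :
    (altLoop xs (ans, f, c)).1 ++ [(altLoop xs (ans, f, c)).2.2] = ans ++ runsR f c xs := by
  induction xs generalizing ans f c with
  | nil => simp [altLoop, runsR]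
  | cons x xs ih =>
    by_cases h : x = f
    · simp [altLoop, runsR, h, ih]
    · simp [altLoop, runsR, h, ih]

theorem runsR_ne_nil (f : Char) (c : Int) (xs : List Char) : runsR f c xs ≠ [] := by
  induction xs generalizing f c with
  | nil => simp [runsR]
  | cons x xs ih => by_cases h : x = f <;> simp [runsR, h, ih]

-- a larger initial count only shifts the first run count
theorem runsR_add (f : Char) (c d : Int) (xs : List Char) :
    runsR f (c + d) xs = ((runsR f c xs).headD 0 + d) :: (runsR f c xs).tail := by
  induction xs generalizing f c with
  | nil => simp [runsR]
  | cons x xs ih =>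
    by_cases h : x = f
    · have : c + d + 1 = (c + 1) + d := by ring
      simp [runsR, h, this, ih]
    · simp [runsR, h]

theorem runsR_replicate (f : Char) (c : Int) (t : Nat) :
    runsR f c (List.replicate t f) = [c + t] := by
  induction t generalizing c with
  | zero => simp [runsR]
  | succ n ih => simp [List.replicate_succ, runsR, ih]; ring

-- appending a trailing run of a fresh character appends its count
theorem runsR_append_run (P : List Char) (f : Char) (c : Int) (c0 : Char) (t : Nat)
    (ht : 1 ≤ t) (hne : P ≠ []) (hlast : P.getLast? ≠ some c0) :
    runsR f c (P ++ List.replicate t c0) = runsR f c P ++ [(t : Int)] := by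
  induction P generalizing f c with
  | nil => exact absurd rfl hne
  | cons x P' ih =>
    by_cases hP : P' = []
    · subst hP
      have hx : x ≠ c0 := by simpa using hlast
      obtain ⟨t', rfl⟩ : ∃ t', t = t' + 1 := ⟨t - 1, by omega⟩
      by_cases h : x = f
      · have hcf : ¬ (c0 = f) := fun hh => hx (by rw [h, hh])
        simp [runsR, h, List.replicate_succ, hcf, runsR_replicate]
        ring
      · have hcx : ¬ (c0 = x) := fun hh => hx hh.symm
        simp [runsR, h, List.replicate_succ, hcx, runsR_replicate]
        omega
    · have hlast' : P'.getLast? ≠ some c0 := by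
        rwa [getLast?_cons_ne_nil x P' hP] at hlast
      by_cases h : x = f <;>
        simp [runsR, h, ih _ _ hP hlast']

theorem map_countdown (l : List Char) :
    ((PySem.List.pyRange ((l.length:Int) - 1) 0 (-1)).map (fun i => PySem.List.pyGetD l i ' ')) = (l.drop 1).reverse := by
  rw [PySem.List.pyRange_neg_one_eq_reverse]
  norm_num
  simpa using PySem.List.map_pyGetD_pyRange (xs := l) (a := 1) (d := ' ') (by norm_num)

theorem map_fwd (l : List Char) (m : Int) (h1 : 1 ≤ m) (h2 : m ≤ (l.length:Int)) :
    (PySem.List.pyRange 1 m 1).map (fun i => PySem.List.pyGetD l i ' ') = (l.drop 1).take (m - 1).toNat := by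
  have hsplit := PySem.List.pyRange_one_append 1 m (l.length:Int) h1 h2
  have hmap : l.drop 1 =
      (PySem.List.pyRange 1 m 1).map (fun i => PySem.List.pyGetD l i ' ')
        ++ (PySem.List.pyRange m (l.length:Int) 1).map (fun i => PySem.List.pyGetD l i ' ') := by
    rw [← List.map_append, ← hsplit]
    simpa using (PySem.List.map_pyGetD_pyRange (xs := l) (a := 1) (d := ' ') (by norm_num)).symm
  have h3 : (l.drop 1).take (((PySem.List.pyRange 1 m 1).map (fun i => PySem.List.pyGetD l i ' ')).length)
      = (PySem.List.pyRange 1 m 1).map (fun i => PySem.List.pyGetD l i ' ') := by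
    rw [hmap]; exact List.take_left
  rw [← h3]
  congr 1
  simp [PySem.List.length_pyRange_one]

-- the pre-sort lists of the two ports agree on any nonempty character list
theorem core_lists (c0 : Char) (rest : List Char) :
    (let l := c0 :: rest
     let cnt := solBack l c0 (PySem.List.pyRange ((l.length : Int) - 1) 0 (-1)) 1
     let st := solFwd l (PySem.List.pyRange 1 ((l.length : Int) - cnt + 1) 1) ([], c0, cnt)
     st.1 ++ [st.2.2])
    =
    (let l := c0 :: rest
     let st := altLoop l ([], c0, 0)
     let counts := st.1 ++ [st.2.2]
     if counts.length > 1 && (PySem.List.pyGetD l (-1) ' ' == c0) then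
       match counts.dropLast, counts.getLast? with
       | h :: t, some p => (h + p) :: t
       | _, _ => counts
     else counts) := by
  obtain ⟨hdecomp, hhead⟩ := runLen_decomp c0 rest.reverse
  set t := runLen c0 rest.reverse with htdef
  have ht_le : t ≤ rest.length := by simpa using runLen_le_length c0 rest.reverse
  set l := c0 :: rest with hldef
  have hl' : l ≠ [] := by simp [hldef]
  have hlen : l.length = rest.length + 1 := by simp [hldef]
  have hdrop : l.drop 1 = rest := by simp [hldef]
  -- P = the part of rest before the trailing run of c0
  set P := (rest.reverse.drop t).reverse with hPdef
  have hrest : rest = P ++ List.replicate t c0 := by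
    conv_lhs => rw [← List.reverse_reverse rest, hdecomp]
    rw [List.reverse_append, List.reverse_replicate]
  have hPlen : P.length = rest.length - t := by simp [hPdef]
  have hPlast : P.getLast? ≠ some c0 := by rw [hPdef, List.getLast?_reverse]; exact hhead
  -- back scan
  have hback : solBack l c0 (PySem.List.pyRange ((l.length : Int) - 1) 0 (-1)) 1 = 1 + (t : Int) := by
    rw [solBack_eq, map_countdown, hdrop]
  -- forward bound
  have hm : (l.length : Int) - (1 + (t : Int)) + 1 = (l.length : Int) - t := by ring
  have h1 : (1 : Int) ≤ (l.length : Int) - t := by rw [hlen]; push_cast; omega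
  have h2 : (l.length : Int) - t ≤ (l.length : Int) := by omega
  have hPtake : (l.drop 1).take (((l.length : Int) - t) - 1).toNat = P := by
    have hn : (((l.length : Int) - t) - 1).toNat = P.length := by rw [hlen, hPlen]; push_cast; omega
    rw [hn, hdrop]
    conv_lhs => rw [hrest]
    exact List.take_left
  -- A's pre-sort list
  have hA : (let cnt := solBack l c0 (PySem.List.pyRange ((l.length : Int) - 1) 0 (-1)) 1
             let st := solFwd l (PySem.List.pyRange 1 ((l.length : Int) - cnt + 1) 1) ([], c0, cnt)
             st.1 ++ [st.2.2]) = runsR c0 (1 + (t : Int)) P := by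
    simp only [hback, hm]
    rw [solFwd_eq, map_fwd l _ h1 h2, hPtake]
    simpa using altLoop_runsR P [] c0 (1 + (t : Int))
  -- B's counts
  have hB : (altLoop l ([], c0, 0)).1 ++ [(altLoop l ([], c0, 0)).2.2] = runsR c0 1 rest := by
    have hstep : altLoop l ([], c0, 0) = altLoop rest ([], c0, 0 + 1) := by
      rw [hldef]; simp [altLoop]
    rw [hstep]
    simpa using altLoop_runsR rest [] c0 1
  simp only [hA, hB]
  by_cases ht0 : t = 0
  · -- no wrapping run: the two lists coincide and no merge fires
    have hPrest : P = rest := by rw [hrest, ht0]; simp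
    have hA0 : runsR c0 (1 + (t : Int)) P = runsR c0 1 rest := by rw [hPrest, ht0]; norm_num
    rw [hA0]
    by_cases hr0 : rest = []
    · subst hr0; simp [runsR]
    · have hlastne : l.getLast? ≠ some c0 := by
        rw [hldef, getLast?_cons_ne_nil c0 rest hr0, ← List.head?_reverse]
        have hdr : rest.reverse.drop t = rest.reverse := by rw [ht0]; rfl
        rw [← hdr]
        exact hhead
      have hcond : (PySem.List.pyGetD l (-1) ' ' == c0) = false := by
        rw [PySem.List.pyGetD_neg_one l ' ' hl']
        simp only [beq_eq_false_iff_ne, ne_eq]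
        intro hc
        exact hlastne (by rw [List.getLast?_eq_some_getLast hl', hc])
      simp [hcond]
  · have ht1 : 1 ≤ t := by omega
    have hrepne : List.replicate t c0 ≠ [] := List.ne_nil_of_length_pos (by simpa using ht1)
    have hrep_eq : List.replicate t c0 = List.replicate (t - 1) c0 ++ [c0] := by
      conv_lhs => rw [show t = t - 1 + 1 from by omega]
      rw [List.replicate_succ']
    have hlast_l : l.getLast? = some c0 := by
      rw [hldef]
      have hsplit2 : (c0 :: rest) = (c0 :: P) ++ List.replicate t c0 := by rw [hrest]; rfl
      rw [hsplit2, getLast?_append_right _ _ hrepne, hrep_eq, List.getLast?_concat]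
    have hcond : (PySem.List.pyGetD l (-1) ' ' == c0) = true := by
      rw [PySem.List.pyGetD_neg_one l ' ' hl']
      have hgl : l.getLast hl' = c0 := by
        have h2 := List.getLast?_eq_some_getLast (l := l) hl'
        rw [h2] at hlast_l; injection hlast_l
      simp [hgl]
    by_cases hP0 : P = []
    · -- the whole string is one run of c0
      have hrrep : rest = List.replicate t c0 := by rw [hrest, hP0]; rfl
      rw [hP0, hrrep, runsR_replicate]
      simp [runsR]
    · -- merge the trailing count into the first
      obtain ⟨h, tl, hQ⟩ := List.exists_cons_of_ne_nil (runsR_ne_nil c0 1 P)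
      have hcounts : runsR c0 1 rest = (h :: tl) ++ [(t : Int)] := by
        rw [hrest, runsR_append_run P c0 1 c0 t ht1 hP0 hPlast, hQ]
      rw [hcounts, runsR_add, hQ]
      simp only [hcond, Bool.and_true]
      simp only [List.dropLast_concat, List.getLast?_concat]
      simp

-- ===== VERDICT (by name: the statement is the Claim_ definition above) =====
theorem solution_spec : Claim_equal_solution := by
  intro s _ hpre
  unfold Spec_solution solution solution_alt
  cases hl : s.toList with
  | nil => exact absurd hl hpre
  | cons c0 rest =>
    simp only [show PySem.List.pyGet? (c0 :: rest) 0 = some c0 from by simp [pysem]]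
    exact congrArg (fun x => PySem.List.sorted x (fun x => x) false) (core_lists c0 rest)
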